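-- pv_equiv track=rewrite | github.com/perqu/rijndael-cipher | cipher.py | inv_rotate_rows
-- ===== SOURCE A (Python) =====
-- def inv_rotate_rows(block, rows_rotates):
--     """
--     Rotating over rows_rotates values in reverse direction, ex.  \n
--
--     rows_rotates = (0,1,2,3)                \n
--     n0 n1 n2 n3   -->   n0 n1 n2 n3         \n
--     n5 n6 n7 n4   -->   n4 n5 n6 n7         \n
--     na nb n8 n9   -->   n8 n9 na nb         \n
--     nf nc nd ne   -->   nc nd ne nf         \n
--
--     Args:
--         block - an list to rotate of numbers of type int
--         rows_rotates - numbers of rotates (1st row, 2nd row, 3rd row, 4th row)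
--
--     Returns:
--         block - list after rotates - List of type int
--     """
--
--     for row, row_rotates in enumerate(rows_rotates):
--         for i in range(row_rotates):
--             temp = block[row * 4 + 3]
--             block[row * 4 + 3] = block[row * 4 + 2]
--             block[row * 4 + 2] = block[row * 4 + 1]
--             block[row * 4 + 1] = block[row * 4]
--             block[row * 4] = temp
--     return block
-- ===== SOURCE B (Python) =====
-- def inv_rotate_rows(block, rows_rotates):
--     """For each row with a positive rotate count, do ONE slice rotation by
--     r % 4 instead of A's r single-step shuffles; mutates block in place and
--     returns it like the original."""
--     for row, r in enumerate(rows_rotates):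
--         if r > 0:
--             s = [block[row * 4 + i] for i in range(4)]
--             k = r % 4
--             if k:
--                 block[row * 4:row * 4 + 4] = s[-k:] + s[:-k]
--     return block
-- ===== Notes on version B (the rewrite author's own statement) =====
-- stated objective: simpler
-- what changed: Replaces A's inner loop of row_rotates single-step shuffles per row by one slice rotation of the row by k = r % 4 (s[-k:] + s[:-k]), done only when r > 0 and k != 0; one O(1) rotation per row instead of r four-assignment passes.
import Mathlib
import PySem

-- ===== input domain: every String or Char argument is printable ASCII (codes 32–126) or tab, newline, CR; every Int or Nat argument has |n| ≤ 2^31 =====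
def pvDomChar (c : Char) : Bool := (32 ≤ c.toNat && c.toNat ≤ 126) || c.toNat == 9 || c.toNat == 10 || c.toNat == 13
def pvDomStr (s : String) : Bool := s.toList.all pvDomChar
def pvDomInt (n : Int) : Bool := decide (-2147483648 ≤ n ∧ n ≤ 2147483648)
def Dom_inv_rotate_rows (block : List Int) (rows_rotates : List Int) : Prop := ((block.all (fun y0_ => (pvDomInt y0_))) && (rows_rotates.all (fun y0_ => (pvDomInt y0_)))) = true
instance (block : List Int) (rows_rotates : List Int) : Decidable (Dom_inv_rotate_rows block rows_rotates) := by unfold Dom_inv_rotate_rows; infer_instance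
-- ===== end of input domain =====

-- B replaces A's inner loop of single-step shuffles by ONE slice rotation of the row
-- by r % 4 (objective: simpler). Both Pythons mutate `block` in place and return it;
-- the equivalence proved here is about the return value.

-- ===== PORT A =====
-- block[i] read; on Pre_ the index is always in range, so the .getD 0 default is unreachable
def pvGetA (b : List Int) (n : Nat) : Int := (PySem.List.pyGet? b (n : Int)).getD 0

-- the four assignments of A's inner loop body; row is the enumerate index
def pvRowStep (row : Nat) (b : List Int) : List Int :=
  let temp := pvGetA b (row * 4 + 3)
  let b := b.set (row * 4 + 3) (pvGetA b (row * 4 + 2))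
  let b := b.set (row * 4 + 2) (pvGetA b (row * 4 + 1))
  let b := b.set (row * 4 + 1) (pvGetA b (row * 4))
  b.set (row * 4) temp

-- Python's enumerate(rows_rotates), indices starting at i
def pvEnum (l : List Int) (i : Nat) : List (Nat × Int) :=
  match l with
  | [] => []
  | x :: xs => (i, x) :: pvEnum xs (i + 1)

def inv_rotate_rows (block : List Int) (rows_rotates : List Int) : List Int :=
  (pvEnum rows_rotates 0).foldl
    (fun b p => (PySem.List.pyRange 0 p.2 1).foldl (fun bb _ => pvRowStep p.1 bb) b)
    block

-- ===== PORT B =====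
-- B's loop body: if r > 0: s = [block[row*4+i] for i in range(4)]; k = r % 4;
-- if k: block[row*4:row*4+4] = s[-k:] + s[:-k].
-- The slice assignment is ported as take/++/drop, exact here because on Pre_ the four
-- replaced cells exist and the replacement list also has length 4.
def pvRowOnce (row : Nat) (r : Int) (b : List Int) : List Int :=
  if r > 0 then
    let s := (PySem.List.pyRange 0 4 1).map (fun i => (PySem.List.pyGet? b ((row * 4 : Nat) + i)).getD 0)
    let k := PySem.Int.mod r 4
    if k ≠ 0 then
      b.take (row * 4) ++
        (PySem.List.slice s (some (-k)) none ++ PySem.List.slice s none (some (-k))) ++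
        b.drop (row * 4 + 4)
    else b
  else b

def inv_rotate_rows_alt (block : List Int) (rows_rotates : List Int) : List Int :=
  (pvEnum rows_rotates 0).foldl (fun b p => pvRowOnce p.1 p.2 b) block

-- ===== PRECONDITION & SPEC =====
-- Pre_ excludes exactly the inputs on which both Pythons raise IndexError: some row has a
-- positive rotation count but block is shorter than that row's four cells.
def Pre_inv_rotate_rows (block : List Int) (rows_rotates : List Int) : Prop :=
  ∀ row ∈ List.range rows_rotates.length,
    0 < rows_rotates.getD row 0 → 4 * (row + 1) ≤ block.length
instance (block : List Int) (rows_rotates : List Int) : Decidable (Pre_inv_rotate_rows block rows_rotates) := by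
  unfold Pre_inv_rotate_rows; infer_instance

def pvWitness_inv_rotate_rows : List Int × List Int := ([1, 2, 3, 4, 5, 6, 7, 8], [3, -1])

def Spec_inv_rotate_rows (block : List Int) (rows_rotates : List Int) (out : List Int) : Prop := out = inv_rotate_rows_alt block rows_rotates
instance (block : List Int) (rows_rotates : List Int) (out : List Int) : Decidable (Spec_inv_rotate_rows block rows_rotates out) := by unfold Spec_inv_rotate_rows; infer_instance

-- ===== CLAIM (what is proved, stated in full; the proofs are below) =====
def Claim_equal_inv_rotate_rows : Prop := ∀ (block : List Int) (rows_rotates : List Int), Dom_inv_rotate_rows block rows_rotates → Pre_inv_rotate_rows block rows_rotates → Spec_inv_rotate_rows block rows_rotates (inv_rotate_rows block rows_rotates)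

-- ===== LEMMAS AND PROOFS =====

-- one slice rotation of a row, the common proof-side description of both programs' row action
def pvRotHead (head : List Int) (r : Int) : List Int :=
  if r > 0 then
    let k := PySem.Int.mod r 4
    if k ≠ 0 then
      PySem.List.slice head (some (-k)) none ++ PySem.List.slice head none (some (-k))
    else head
  else head

-- structural recursion over rows: what both ports compute on the suffix of the block
def pvGo (seg : List Int) (rots : List Int) : List Int :=
  match rots with
  | [] => seg
  | r :: rest => pvRotHead (seg.take 4) r ++ pvGo (seg.drop 4) rest

-- the quadruple rotation one pass of A's inner-loop body performs on a full row
def pvG (v : Int × Int × Int × Int) : Int × Int × Int × Int :=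
  (v.2.2.2, v.1, v.2.1, v.2.2.1)

def pvQuad (v : Int × Int × Int × Int) : List Int := [v.1, v.2.1, v.2.2.1, v.2.2.2]

lemma pvSet_append (l₁ l₂ : List Int) (j : Nat) (v : Int) :
    (l₁ ++ l₂).set (l₁.length + j) v = l₁ ++ l₂.set j v := by
  induction l₁ with
  | nil => simp
  | cons x xs ih => simp [Nat.succ_add, ih]

lemma pvGetA_append (l₁ l₂ : List Int) (j : Nat) :
    pvGetA (l₁ ++ l₂) (l₁.length + j) = (l₂[j]?).getD 0 := by
  simp only [pvGetA, PySem.List.pyGet?_natCast]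
  rw [List.getElem?_append_right (by omega)]
  simp

lemma pvRowStep_eq (pref suff : List Int) (a b c d : Int) (row : Nat)
    (h : pref.length = row * 4) :
    pvRowStep row (pref ++ a :: b :: c :: d :: suff) = pref ++ d :: a :: b :: c :: suff := by
  have e0 : row * 4 = pref.length + 0 := by omega
  have e1 : row * 4 + 1 = pref.length + 1 := by omega
  have e2 : row * 4 + 2 = pref.length + 2 := by omega
  have e3 : row * 4 + 3 = pref.length + 3 := by omega
  simp only [pvRowStep]
  simp only [e3]; simp only [e2]; simp only [e1]; simp only [e0]
  simp only [pvGetA_append, pvSet_append]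
  simp [List.set]

lemma pvFoldl_const {α β : Type} (l : List α) (f : β → β) (b : β) :
    l.foldl (fun x _ => f x) b = f^[l.length] b := by
  induction l generalizing b with
  | nil => rfl
  | cons x xs ih => simp [List.foldl, ih, Function.iterate_succ_apply]

lemma pvG_four (v : Int × Int × Int × Int) : pvG^[4] v = v := by
  obtain ⟨a, b, c, d⟩ := v; rfl

lemma pvG_iterate_mod (n : Nat) (v : Int × Int × Int × Int) :
    pvG^[n] v = pvG^[n % 4] v := by
  have key : ∀ q j (v : Int × Int × Int × Int), pvG^[4 * q + j] v = pvG^[j] v := by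
    intro q
    induction q with
    | zero => simp
    | succ q ih =>
      intro j v
      have h : 4 * (q + 1) + j = (4 * q + j) + 4 := by omega
      rw [h, Function.iterate_add_apply, pvG_four, ih]
  conv_lhs => rw [← Nat.div_add_mod n 4]
  exact key _ _ v

lemma pvRotHead_quad (v : Int × Int × Int × Int) (r : Int) (hr : 0 < r) :
    pvRotHead (pvQuad v) r = pvQuad (pvG^[r.toNat] v) := by
  obtain ⟨a, b, c, d⟩ := v
  rw [pvG_iterate_mod]
  have hmod : PySem.Int.mod r 4 = ((r.toNat % 4 : Nat) : Int) := by
    rw [PySem.Int.mod_eq_emod_of_pos (by omega)]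
    omega
  have h4 : r.toNat % 4 = 0 ∨ r.toNat % 4 = 1 ∨ r.toNat % 4 = 2 ∨ r.toNat % 4 = 3 := by omega
  rcases h4 with h | h | h | h <;>
    · rw [h] at hmod ⊢
      simp only [pvRotHead, if_pos hr, hmod]
      rfl

lemma pvInner (pref suff : List Int) (v : Int × Int × Int × Int) (row n : Nat)
    (h : pref.length = row * 4) :
    (pvRowStep row)^[n] (pref ++ (pvQuad v ++ suff)) = pref ++ (pvQuad (pvG^[n] v) ++ suff) := by
  induction n generalizing v with
  | zero => simp
  | succ n ih =>
    obtain ⟨a, b, c, d⟩ := v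
    rw [Function.iterate_succ_apply]
    have step : pvRowStep row (pref ++ (pvQuad (a, b, c, d) ++ suff))
        = pref ++ (pvQuad (pvG (a, b, c, d)) ++ suff) := pvRowStep_eq pref suff a b c d row h
    rw [step, ih, ← Function.iterate_succ_apply]

lemma pvMain : ∀ (rots : List Int) (i : Nat) (block : List Int),
    (∀ j, j < rots.length → 0 < rots.getD j 0 → 4 * (i + j + 1) ≤ block.length) →
    (pvEnum rots i).foldl
        (fun b p => (PySem.List.pyRange 0 p.2 1).foldl (fun bb _ => pvRowStep p.1 bb) b) block
      = block.take (4 * i) ++ pvGo (block.drop (4 * i)) rots := by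
  intro rots
  induction rots with
  | nil => intro i block _; simp [pvEnum, pvGo]
  | cons r rest ih =>
    intro i block hpre
    simp only [pvEnum, List.foldl_cons]
    by_cases hr : 0 < r
    · -- row i really rotates: block has the full row
      have h4 : 4 * (i + 1) ≤ block.length := by
        have := hpre 0 (by simp) (by simpa using hr)
        omega
      have hlen : 4 ≤ (block.drop (4 * i)).length := by
        rw [List.length_drop]; omega
      obtain ⟨a, b, c, d, suff, hsuff⟩ :
          ∃ a b c d suff, block.drop (4 * i) = a :: b :: c :: d :: suff := by
        rcases h1 : block.drop (4 * i) with _ | ⟨a, _ | ⟨b, _ | ⟨c, _ | ⟨d, suff⟩⟩⟩⟩ <;>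
          first
            | (exact ⟨_, _, _, _, _, rfl⟩)
            | (exfalso; rw [h1] at hlen; simp at hlen)
      have hblock : block = block.take (4 * i) ++ (pvQuad (a, b, c, d) ++ suff) := by
        conv_lhs => rw [← List.take_append_drop (4 * i) block]
        rw [hsuff]; rfl
      have hpl : (block.take (4 * i)).length = i * 4 := by
        rw [List.length_take]; omega
      have hinner : (PySem.List.pyRange 0 r 1).foldl (fun bb _ => pvRowStep i bb) block
          = block.take (4 * i) ++ (pvQuad (pvG^[r.toNat] (a, b, c, d)) ++ suff) := by
        rw [pvFoldl_const, PySem.List.length_pyRange_one]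
        have : (r - 0).toNat = r.toNat := by omega
        rw [this]
        conv_lhs => rw [hblock]
        exact pvInner _ _ _ _ _ hpl
      rw [hinner]
      set g := pvG^[r.toNat] (a, b, c, d) with hg
      have hlen' : (block.take (4 * i) ++ (pvQuad g ++ suff)).length = block.length := by
        conv_rhs => rw [hblock]
        simp [pvQuad]
      rw [ih (i + 1) _ (by
        intro j hj hpos
        have := hpre (j + 1) (by simpa using hj) (by simpa using hpos)
        omega)]
      have hql : (block.take (4 * i) ++ pvQuad g).length = 4 * (i + 1) := by
        simp [pvQuad]; omega
      have htake : (block.take (4 * i) ++ (pvQuad g ++ suff)).take (4 * (i + 1))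
          = block.take (4 * i) ++ pvQuad g := by
        rw [← List.append_assoc]
        exact List.take_left' hql
      have hdrop : (block.take (4 * i) ++ (pvQuad g ++ suff)).drop (4 * (i + 1)) = suff := by
        rw [← List.append_assoc]
        exact List.drop_left' hql
      rw [htake, hdrop]
      conv_rhs => rw [pvGo]
      rw [hsuff]
      have hhead : (a :: b :: c :: d :: suff).take 4 = pvQuad (a, b, c, d) := rfl
      have htail : (a :: b :: c :: d :: suff).drop 4 = suff := rfl
      rw [hhead, htail, pvRotHead_quad _ _ hr, ← hg, List.append_assoc]
    · -- r ≤ 0: A's inner loop and B's rotation are both no-ops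
      rw [PySem.List.pyRange_one_eq_nil (by omega)]
      simp only [List.foldl_nil]
      rw [ih (i + 1) block (by
        intro j hj hpos
        have := hpre (j + 1) (by simpa using hj) (by simpa using hpos)
        omega)]
      conv_rhs => rw [pvGo]
      have hrot : pvRotHead ((block.drop (4 * i)).take 4) r = (block.drop (4 * i)).take 4 := by
        simp [pvRotHead, hr]
      rw [hrot, List.drop_drop]
      have h1 : 4 * (i + 1) = 4 * i + 4 := by omega
      rw [h1, List.take_add, List.append_assoc]

-- B's loop body on a full row acts as pvRotHead on the row (r > 0 case)
lemma pvRowOnce_eq (pref suff : List Int) (v : Int × Int × Int × Int) (row : Nat) (r : Int)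
    (h : pref.length = row * 4) (hr : 0 < r) :
    pvRowOnce row r (pref ++ (pvQuad v ++ suff))
      = pref ++ (pvRotHead (pvQuad v) r ++ suff) := by
  obtain ⟨a, b, c, d⟩ := v
  have hs : (PySem.List.pyRange 0 4 1).map
      (fun i => (PySem.List.pyGet? (pref ++ (pvQuad (a, b, c, d) ++ suff)) ((row * 4 : Nat) + i)).getD 0)
      = pvQuad (a, b, c, d) := by
    have hrange : PySem.List.pyRange 0 4 1 = [0, 1, 2, 3] := by decide
    rw [hrange]
    simp only [List.map]
    have get_eq : ∀ j : Nat, j < 4 →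
        (PySem.List.pyGet? (pref ++ (pvQuad (a, b, c, d) ++ suff)) ((row * 4 : Nat) + (j : Int))).getD 0
          = ((pvQuad (a, b, c, d) ++ suff)[j]?).getD 0 := by
      intro j hj
      have hcast : ((row * 4 : Nat) : Int) + (j : Int) = ((pref.length + j : Nat) : Int) := by
        push_cast; omega
      rw [hcast, ← pvGetA_append pref (pvQuad (a, b, c, d) ++ suff) j]
      rfl
    have h0 := get_eq 0 (by omega); have h1 := get_eq 1 (by omega)
    have h2 := get_eq 2 (by omega); have h3 := get_eq 3 (by omega)
    norm_num at h0 h1 h2 h3 ⊢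
    rw [h0, h1, h2, h3]
    simp [pvQuad]
  have htake : (pref ++ (pvQuad (a, b, c, d) ++ suff)).take (row * 4) = pref := by
    rw [List.take_left' h]
  have hdrop : (pref ++ (pvQuad (a, b, c, d) ++ suff)).drop (row * 4 + 4) = suff := by
    rw [← List.append_assoc]
    exact List.drop_left' (by simp [pvQuad]; omega)
  simp only [pvRowOnce, pvRotHead, if_pos hr, hs, htake, hdrop]
  by_cases hk : PySem.Int.mod r 4 ≠ 0
  · simp only [if_pos hk]
    rw [List.append_assoc]
  · simp only [if_neg hk]

-- B's fold equals the same structural description as A's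
lemma pvMainB : ∀ (rots : List Int) (i : Nat) (block : List Int),
    (∀ j, j < rots.length → 0 < rots.getD j 0 → 4 * (i + j + 1) ≤ block.length) →
    (pvEnum rots i).foldl (fun b p => pvRowOnce p.1 p.2 b) block
      = block.take (4 * i) ++ pvGo (block.drop (4 * i)) rots := by
  intro rots
  induction rots with
  | nil => intro i block _; simp [pvEnum, pvGo]
  | cons r rest ih =>
    intro i block hpre
    simp only [pvEnum, List.foldl_cons]
    by_cases hr : 0 < r
    · have h4 : 4 * (i + 1) ≤ block.length := by
        have := hpre 0 (by simp) (by simpa using hr)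
        omega
      have hlen : 4 ≤ (block.drop (4 * i)).length := by
        rw [List.length_drop]; omega
      obtain ⟨a, b, c, d, suff, hsuff⟩ :
          ∃ a b c d suff, block.drop (4 * i) = a :: b :: c :: d :: suff := by
        rcases h1 : block.drop (4 * i) with _ | ⟨a, _ | ⟨b, _ | ⟨c, _ | ⟨d, suff⟩⟩⟩⟩ <;>
          first
            | (exact ⟨_, _, _, _, _, rfl⟩)
            | (exfalso; rw [h1] at hlen; simp at hlen)
      have hblock : block = block.take (4 * i) ++ (pvQuad (a, b, c, d) ++ suff) := by
        conv_lhs => rw [← List.take_append_drop (4 * i) block]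
        rw [hsuff]; rfl
      have hpl : (block.take (4 * i)).length = i * 4 := by
        rw [List.length_take]; omega
      have hstep : pvRowOnce i r block
          = block.take (4 * i) ++ (pvRotHead (pvQuad (a, b, c, d)) r ++ suff) := by
        conv_lhs => rw [hblock]
        exact pvRowOnce_eq _ _ _ _ _ hpl hr
      rw [hstep]
      set g := pvRotHead (pvQuad (a, b, c, d)) r with hg
      have hgl : g.length = 4 := by
        rw [hg, pvRotHead_quad _ _ hr]; rfl
      have hbl : (block.take (4 * i) ++ (g ++ suff)).length = block.length := by
        conv_rhs => rw [hblock]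
        simp [pvQuad, hgl]
        omega
      rw [ih (i + 1) _ (by
        intro j hj hpos
        have := hpre (j + 1) (by simpa using hj) (by simpa using hpos)
        rw [hbl]
        omega)]
      have hql : (block.take (4 * i) ++ g).length = 4 * (i + 1) := by
        simp [hgl]; omega
      have htake : (block.take (4 * i) ++ (g ++ suff)).take (4 * (i + 1))
          = block.take (4 * i) ++ g := by
        rw [← List.append_assoc]
        exact List.take_left' hql
      have hdrop : (block.take (4 * i) ++ (g ++ suff)).drop (4 * (i + 1)) = suff := by
        rw [← List.append_assoc]
        exact List.drop_left' hql
      rw [htake, hdrop]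
      conv_rhs => rw [pvGo]
      rw [hsuff]
      have hhead : (a :: b :: c :: d :: suff).take 4 = pvQuad (a, b, c, d) := rfl
      have htail : (a :: b :: c :: d :: suff).drop 4 = suff := rfl
      rw [hhead, htail, ← hg, List.append_assoc]
    · -- r ≤ 0: B skips the row
      have hskip : pvRowOnce i r block = block := by
        simp [pvRowOnce, hr]
      rw [hskip]
      rw [ih (i + 1) block (by
        intro j hj hpos
        have := hpre (j + 1) (by simpa using hj) (by simpa using hpos)
        omega)]
      conv_rhs => rw [pvGo]
      have hrot : pvRotHead ((block.drop (4 * i)).take 4) r = (block.drop (4 * i)).take 4 := by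
        simp [pvRotHead, hr]
      rw [hrot, List.drop_drop]
      have h1 : 4 * (i + 1) = 4 * i + 4 := by omega
      rw [h1, List.take_add, List.append_assoc]

-- ===== VERDICT (by name: the statement is the Claim_ definition above) =====
theorem inv_rotate_rows_spec : Claim_equal_inv_rotate_rows := by
  intro block rots _ hpre
  unfold Spec_inv_rotate_rows inv_rotate_rows inv_rotate_rows_alt
  have hp : ∀ j, j < rots.length → 0 < rots.getD j 0 → 4 * (0 + j + 1) ≤ block.length := by
    intro j hj hpos
    have := hpre j (List.mem_range.mpr hj) hpos
    omega
  rw [pvMain rots 0 block hp, pvMainB rots 0 block hp]
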